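-- pv_equiv track=rewrite | github.com/SQNing/Design_Mott_Materials | translation-invariant-spin-model-simplifier/scripts/classical/certified_glt/certify_cpn_glt.py | _dominant_key
-- ===== SOURCE A (Python) =====
-- def _dominant_key(counter_like):
--     if not counter_like:
--         return None
--     items = list(counter_like.items())
--     items = [item for item in items if float(item[1]) > 0.0]
--     if not items:
--         return None
--     items.sort(key=lambda item: (-float(item[1]), str(item[0])))
--     return str(items[0][0])
-- ===== SOURCE B (Python) =====
-- def _dominant_key(counter_like):
--     best = None
--     for _k, v in counter_like.items():
--         fv = float(v)
--         if fv > 0.0 and (best is None or best < fv):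
--             best = fv
--     if best is None:
--         return None
--     return min(str(k) for k, v in counter_like.items() if float(v) == best)
-- ===== Notes on version B (the rewrite author's own statement) =====
-- stated objective: faster
-- what changed: A builds the positive-valued item list and sorts it once by the composite key (-value, key) to take the first element; B never sorts: one pass keeps a running maximum of the positive values, a second pass takes the lexicographic minimum of the keys attaining it.
import Mathlib
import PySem

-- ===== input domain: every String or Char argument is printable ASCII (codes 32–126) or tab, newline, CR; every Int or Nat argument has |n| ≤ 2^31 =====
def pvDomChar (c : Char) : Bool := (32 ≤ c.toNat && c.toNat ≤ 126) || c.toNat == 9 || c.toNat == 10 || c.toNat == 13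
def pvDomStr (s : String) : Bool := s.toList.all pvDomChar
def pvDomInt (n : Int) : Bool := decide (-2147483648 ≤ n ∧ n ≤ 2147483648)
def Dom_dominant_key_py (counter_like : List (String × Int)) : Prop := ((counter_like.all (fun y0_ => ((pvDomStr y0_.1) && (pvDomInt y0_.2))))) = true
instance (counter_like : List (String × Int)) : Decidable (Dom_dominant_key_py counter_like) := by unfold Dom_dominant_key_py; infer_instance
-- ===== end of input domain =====

-- B replaces A's composite-key sort by two linear passes (running max of the positive values, then lexicographic min of the tying keys); equal return values are proved, no side effects involved.


-- ===== PORT A =====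
def dominant_key_py (counter_like : List (String × Int)) : Option String :=
  if counter_like = [] then none
  else
    let items := counter_like.filter (fun item => decide ((0 : Int) < item.2))
    if items = [] then none
    else
      match PySem.List.sorted2 items (fun item => -item.2) (fun item => item.1) with
      | [] => none
      | h :: _ => some h.1

-- ===== PORT B =====
-- B-side helper: the body of B's first loop ('if fv > 0.0 and (best is None or best < fv): best = fv')
def pvBestStep (best : Option Int) (v : Int) : Option Int :=
  if decide (0 < v) && (match best with | none => true | some m => decide (m < v)) then some v
  else best

def dominant_key_py_alt (counter_like : List (String × Int)) : Option String :=
  let best := counter_like.foldl (fun acc item => pvBestStep acc item.2) none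
  match best with
  | none => none
  | some m =>
      PySem.List.min?
        ((counter_like.filter (fun it => decide (it.2 = m))).map (fun it => it.1)) (fun k => k)

-- ===== PRECONDITION & SPEC =====
-- Pre_ excludes association lists with duplicate keys: the Python argument is a dict, which
-- cannot contain two entries with the same key, so those lists encode no dict input.
def Pre_dominant_key_py (counter_like : List (String × Int)) : Prop :=
  (counter_like.map Prod.fst).Nodup
instance (counter_like : List (String × Int)) : Decidable (Pre_dominant_key_py counter_like) := by
  unfold Pre_dominant_key_py; infer_instance

def pvWitness_dominant_key_py : (List (String × Int)) := [("a", 2), ("b", 2), ("c", -1)]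

def Spec_dominant_key_py (counter_like : List (String × Int)) (out : Option String) : Prop := out = dominant_key_py_alt counter_like
instance (counter_like : List (String × Int)) (out : Option String) : Decidable (Spec_dominant_key_py counter_like out) := by unfold Spec_dominant_key_py; infer_instance

-- ===== CLAIM (what is proved, stated in full; the proofs are below) =====
def Claim_equal_dominant_key_py : Prop := ∀ (counter_like : List (String × Int)), Dom_dominant_key_py counter_like → Pre_dominant_key_py counter_like → Spec_dominant_key_py counter_like (dominant_key_py counter_like)

-- ===== LEMMAS AND PROOFS =====

-- the lexicographic sort key (-value, key) of A, as a linearly ordered value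
def pvK (a : String × Int) : Int ×ₗ String := toLex (-a.2, a.1)

-- the Boolean 'strictly earlier' relation sorted2 uses internally
def pvBefore (a b : String × Int) : Bool :=
  decide ((-a.2 : Int) < -b.2) || (!decide ((-b.2 : Int) < -a.2) && decide (a.1 < b.1))

theorem pvBefore_iff (a b : String × Int) : pvBefore a b = true ↔ pvK a < pvK b := by
  simp only [pvBefore, pvK, Prod.Lex.toLex_lt_toLex, Bool.or_eq_true, Bool.and_eq_true,
    Bool.not_eq_true', decide_eq_true_eq, decide_eq_false_iff_not]
  constructor
  · rintro (h | ⟨h1, h2⟩)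
    · exact Or.inl h
    · rcases lt_or_eq_of_le (not_lt.mp h1) with h | h
      · exact Or.inl h
      · exact Or.inr ⟨h, h2⟩
  · rintro (h | ⟨h1, h2⟩)
    · exact Or.inl h
    · exact Or.inr ⟨not_lt.mpr (le_of_eq h1), h2⟩

theorem pvBefore_false_iff (a b : String × Int) : pvBefore a b = false ↔ pvK b ≤ pvK a := by
  rw [← Bool.not_eq_true, pvBefore_iff]; exact not_lt

theorem pvSorted2_eq (items : List (String × Int)) :
    PySem.List.sorted2 items (fun it => -it.2) (fun it => it.1)
      = items.foldl (fun acc x => PySem.List.insertBy pvBefore x acc) [] := rfl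

theorem pvHead_insertBy (x : String × Int) (acc : List (String × Int)) :
    (PySem.List.insertBy pvBefore x acc).head?
      = some (match acc.head? with | none => x | some y => if pvBefore x y then x else y) := by
  cases acc with
  | nil => rfl
  | cons y ys =>
      simp only [PySem.List.insertBy, List.head?_cons]
      split <;> simp_all

theorem pvHead_fold_insertBy (l : List (String × Int)) :
    ∀ (acc : List (String × Int)) (a : String × Int), acc.head? = some a →
      (l.foldl (fun acc x => PySem.List.insertBy pvBefore x acc) acc).head?
        = some (l.foldl (fun h x => if pvBefore x h then x else h) a) := by
  induction l with
  | nil => intro acc a h; simpa using h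
  | cons x t ih =>
      intro acc a h
      simp only [List.foldl_cons]
      exact ih _ _ (by rw [pvHead_insertBy, h])

theorem pvPick_min (t : List (String × Int)) :
    ∀ (a : String × Int),
      (t.foldl (fun h x => if pvBefore x h then x else h) a = a
        ∨ t.foldl (fun h x => if pvBefore x h then x else h) a ∈ t)
      ∧ ∀ y ∈ a :: t, pvK (t.foldl (fun h x => if pvBefore x h then x else h) a) ≤ pvK y := by
  induction t with
  | nil => intro a; exact ⟨Or.inl rfl, by simp⟩
  | cons x t ih =>
      intro a
      simp only [List.foldl_cons]
      rcases ih (if pvBefore x a then x else a) with ⟨hmem, hmin⟩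
      have hh' : pvK (t.foldl (fun h x => if pvBefore x h then x else h) (if pvBefore x a then x else a))
          ≤ pvK (if pvBefore x a then x else a) := hmin _ (List.mem_cons_self ..)
      constructor
      · rcases hmem with h | h
        · rw [h]
          by_cases hb : pvBefore x a = true
          · simp [hb]
          · simp [hb]
        · exact Or.inr (List.mem_cons_of_mem _ h)
      · intro y hy
        rcases List.mem_cons.mp hy with rfl | hy
        · -- y = a
          by_cases hb : pvBefore x y = true
          · exact le_trans (by simpa [hb] using hh') (le_of_lt ((pvBefore_iff _ _).mp hb))
          · simpa [hb] using hh'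
        · rcases List.mem_cons.mp hy with rfl | hy
          · -- y = x
            by_cases hb : pvBefore y a = true
            · simpa [hb] using hh'
            · exact le_trans (by simpa [hb] using hh')
                ((pvBefore_false_iff _ _).mp (Bool.not_eq_true _ ▸ hb))
          · exact hmin y (List.mem_cons_of_mem _ hy)

theorem pvBest_none (cl : List (String × Int)) :
    ∀ (o : Option Int), (∀ it ∈ cl, it.2 ≤ 0) →
      cl.foldl (fun acc item => pvBestStep acc item.2) o = o := by
  induction cl with
  | nil => intro o _; rfl
  | cons x t ih =>
      intro o h
      simp only [List.foldl_cons]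
      have hx : x.2 ≤ 0 := h x (List.mem_cons_self ..)
      have : pvBestStep o x.2 = o := by
        simp [pvBestStep, not_lt.mpr hx]
      rw [this]
      exact ih o (fun it hit => h it (List.mem_cons_of_mem _ hit))

theorem pvBest_spec (cl : List (String × Int)) :
    ∀ (o : Option Int),
      (cl.foldl (fun acc item => pvBestStep acc item.2) o = o
        ∨ ∃ it ∈ cl, cl.foldl (fun acc item => pvBestStep acc item.2) o = some it.2 ∧ 0 < it.2)
      ∧ (∀ v, o = some v →
          ∃ w, cl.foldl (fun acc item => pvBestStep acc item.2) o = some w ∧ v ≤ w)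
      ∧ (∀ it ∈ cl, 0 < it.2 →
          ∃ w, cl.foldl (fun acc item => pvBestStep acc item.2) o = some w ∧ it.2 ≤ w) := by
  induction cl with
  | nil =>
      intro o
      refine ⟨Or.inl rfl, fun v hv => ⟨v, hv, le_refl v⟩, by simp⟩
  | cons x t ih =>
      intro o
      simp only [List.foldl_cons]
      rcases ih (pvBestStep o x.2) with ⟨h1, h2, h3⟩
      have hstep : pvBestStep o x.2 = o ∨ (pvBestStep o x.2 = some x.2 ∧ 0 < x.2) := by
        cases o with
        | none =>
            by_cases hp : (0 : Int) < x.2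
            · exact Or.inr ⟨by simp [pvBestStep, hp], hp⟩
            · exact Or.inl (by simp [pvBestStep, hp])
        | some m =>
            by_cases hm : m < x.2
            · by_cases hp : (0 : Int) < x.2
              · exact Or.inr ⟨by simp [pvBestStep, hp, hm], hp⟩
              · exact Or.inl (by simp [pvBestStep, hp])
            · exact Or.inl (by simp [pvBestStep, hm])
      refine ⟨?_, ?_, ?_⟩
      · rcases h1 with h1 | ⟨it, hit, he, hp⟩
        · rw [h1]
          rcases hstep with h | ⟨h, hp⟩
          · exact Or.inl h
          · exact Or.inr ⟨x, List.mem_cons_self .., h, hp⟩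
        · exact Or.inr ⟨it, List.mem_cons_of_mem _ hit, he, hp⟩
      · intro v hv
        rcases hstep with h | ⟨h, hp⟩
        · exact h2 v (h.trans hv)
        · subst hv
          have hcond : v ≤ x.2 := by
            by_contra hnot
            simp [pvBestStep, show ¬ v < x.2 by omega] at h
            omega
          rcases h2 x.2 h with ⟨w, hw, hle⟩
          exact ⟨w, hw, le_trans hcond hle⟩
      · intro it hit hp
        rcases List.mem_cons.mp hit with rfl | hmem
        · -- it = x : after the step, some value ≥ x.2 is in the accumulator
          have : ∃ u, pvBestStep o it.2 = some u ∧ it.2 ≤ u := by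
            cases o with
            | none => exact ⟨it.2, by simp [pvBestStep, hp], le_refl _⟩
            | some m =>
                by_cases hm : m < it.2
                · exact ⟨it.2, by simp [pvBestStep, hp, hm], le_refl _⟩
                · exact ⟨m, by simp [pvBestStep, hm], by omega⟩
          rcases this with ⟨u, hu, hle⟩
          rcases h2 u hu with ⟨w, hw, hle'⟩
          exact ⟨w, hw, le_trans hle hle'⟩
        · exact h3 it hmem hp

-- ===== VERDICT (by name: the statement is the Claim_ definition above) =====
theorem dominant_key_py_spec : Claim_equal_dominant_key_py := by
  intro cl _ _
  unfold Spec_dominant_key_py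
  by_cases hnil : cl = []
  · subst hnil; rfl
  · by_cases hitems : cl.filter (fun item => decide ((0 : Int) < item.2)) = []
    · -- no positive value: both return none
      have hall : ∀ it ∈ cl, it.2 ≤ 0 := by
        intro it hit
        have := List.filter_eq_nil_iff.mp hitems it hit
        simp only [decide_eq_true_eq] at this
        omega
      have hA : dominant_key_py cl = none := by
        simp only [dominant_key_py]
        rw [if_neg hnil, if_pos hitems]
      have hB : dominant_key_py_alt cl = none := by
        simp only [dominant_key_py_alt]
        rw [pvBest_none cl none hall]
      rw [hA, hB]
    · -- there is a positive value
      obtain ⟨a, t, hat⟩ := List.exists_cons_of_ne_nil hitems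
      rcases pvPick_min t a with ⟨hmem0, hmin0⟩
      set m := t.foldl (fun h x => if pvBefore x h then x else h) a with hmdef
      have hm_items : m ∈ cl.filter (fun item => decide ((0 : Int) < item.2)) := by
        rw [hat]
        rcases hmem0 with h | h
        · rw [h]; exact List.mem_cons_self ..
        · exact List.mem_cons_of_mem _ h
      have hmin : ∀ y ∈ cl.filter (fun item => decide ((0 : Int) < item.2)), pvK m ≤ pvK y := by
        intro y hy; rw [hat] at hy; exact hmin0 y hy
      rcases List.mem_filter.mp hm_items with ⟨hmcl, hmposb⟩
      have hmpos : (0 : Int) < m.2 := by simpa using hmposb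
      -- A returns the head of the sorted list, which is the pvK-minimum m
      have hhead : (PySem.List.sorted2
          (cl.filter (fun item => decide ((0 : Int) < item.2)))
          (fun item => -item.2) (fun item => item.1)).head? = some m := by
        rw [pvSorted2_eq, hat]
        simp only [List.foldl_cons]
        exact pvHead_fold_insertBy t _ a rfl
      have hA : dominant_key_py cl = some m.1 := by
        simp only [dominant_key_py]
        rw [if_neg hnil, if_neg hitems]
        cases hsort : PySem.List.sorted2
            (cl.filter (fun item => decide ((0 : Int) < item.2)))
            (fun item => -item.2) (fun item => item.1) with
        | nil => rw [hsort] at hhead; simp at hhead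
        | cons h tt =>
            rw [hsort] at hhead
            simp only [List.head?_cons, Option.some.injEq] at hhead
            rw [hhead]
      -- B's first pass computes exactly m.2
      have hbest : cl.foldl (fun acc item => pvBestStep acc item.2) none = some m.2 := by
        rcases pvBest_spec cl none with ⟨h1, _, h3⟩
        rcases h3 m hmcl hmpos with ⟨w, hw, hle⟩
        rcases h1 with h1 | ⟨it, hitcl, he, hp⟩
        · rw [h1] at hw; cases hw
        · have hitem : it ∈ cl.filter (fun item => decide ((0 : Int) < item.2)) :=
            List.mem_filter.mpr ⟨hitcl, by simpa using hp⟩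
          have hKle := hmin it hitem
          simp only [pvK, Prod.Lex.toLex_le_toLex] at hKle
          have hle2 : it.2 ≤ m.2 := by rcases hKle with h | ⟨h, _⟩ <;> omega
          have hweq : w = it.2 := by rw [he] at hw; exact (Option.some.injEq ..).mp hw.symm
          rw [he]
          congr 1
          omega
      -- B's second pass returns m.1
      have hB : dominant_key_py_alt cl = some m.1 := by
        simp only [dominant_key_py_alt]
        rw [hbest]
        show PySem.List.min?
          ((cl.filter (fun it => decide (it.2 = m.2))).map (fun it => it.1)) (fun k => k)
            = some m.1
        have hmemxs : m.1 ∈ (cl.filter (fun it => decide (it.2 = m.2))).map (fun it => it.1) :=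
          List.mem_map.mpr ⟨m, List.mem_filter.mpr ⟨hmcl, by simp⟩, rfl⟩
        cases hmq : PySem.List.min?
            ((cl.filter (fun it => decide (it.2 = m.2))).map (fun it => it.1)) (fun k => k) with
        | none =>
            rw [PySem.List.min?_eq_none_iff] at hmq
            rw [hmq] at hmemxs
            simp at hmemxs
        | some k =>
            have hkmem := PySem.List.min?_mem hmq
            have hkmin := PySem.List.min?_isMin hmq
            have h1 : k ≤ m.1 := hkmin _ hmemxs
            have h2 : m.1 ≤ k := by
              rcases List.mem_map.mp hkmem with ⟨y, hyf, rfl⟩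
              rcases List.mem_filter.mp hyf with ⟨hycl, hyvb⟩
              have hyv : y.2 = m.2 := by simpa using hyvb
              have hyitem : y ∈ cl.filter (fun item => decide ((0 : Int) < item.2)) :=
                List.mem_filter.mpr ⟨hycl, by simp; omega⟩
              have hKle := hmin y hyitem
              simp only [pvK, Prod.Lex.toLex_le_toLex] at hKle
              rcases hKle with h | ⟨_, h⟩
              · omega
              · exact h
            rw [le_antisymm h1 h2]
      rw [hA, hB]
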